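-- pv_equiv track=rewrite | github.com/mercybabayemi/python_class | classtask/february2025/functiontask/src/mixedcaseword.py | get_sorted_mixed_case_words
-- ===== SOURCE A (Python) =====
-- def get_sorted_mixed_case_words(word: str):
--     if not type(word):
--         raise TypeError
--     upper_case = " "
--     lower_case = " "
--     others = " "
--     for letter in word:
--         if letter.isupper():
--             upper_case += letter
--         elif letter.islower():
--             lower_case += letter
--         else:
--             others += letter
--
--     new_word = upper_case + lower_case + others
--
--     return  new_word.replace(" ", "")
-- ===== SOURCE B (Python) =====
-- def get_sorted_mixed_case_words(word: str):
--     return ''.join(sorted((c for c in word if c != ' '),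
--                           key=lambda c: 0 if c.isupper() else 1 if c.islower() else 2))
-- ===== Notes on version B (the rewrite author's own statement) =====
-- stated objective: idiomatic
-- what changed: Replaces the one-pass three-bucket string accumulation followed by a space-stripping pass with a single stable sort of the non-space characters keyed by category (upper, then lower, then other); stability reproduces the bucket concatenation.
import Mathlib
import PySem

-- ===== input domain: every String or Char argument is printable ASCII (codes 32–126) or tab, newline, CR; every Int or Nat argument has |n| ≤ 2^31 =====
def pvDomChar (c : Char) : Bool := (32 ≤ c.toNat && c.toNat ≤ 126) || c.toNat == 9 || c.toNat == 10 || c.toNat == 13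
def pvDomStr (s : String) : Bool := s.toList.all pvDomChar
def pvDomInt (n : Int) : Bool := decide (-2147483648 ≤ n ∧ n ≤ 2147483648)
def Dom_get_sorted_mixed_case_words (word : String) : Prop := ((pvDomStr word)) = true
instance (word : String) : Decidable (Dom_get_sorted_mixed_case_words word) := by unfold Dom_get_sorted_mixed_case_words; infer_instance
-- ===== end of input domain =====

-- B replaces A's one-pass three-bucket accumulation plus space-stripping pass by one stable sort of the
-- non-space characters keyed by category (idiomatic; not faster).
-- A's 'if not type(word): raise TypeError' is dead code (type(word) is always truthy) and is ported as nothing.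

-- ===== PORT A =====
def get_sorted_mixed_case_words (word : String) : String :=
  let acc := word.toList.foldl
    (fun (acc : List Char × List Char × List Char) letter =>
      if PySem.Chars.isupper letter then (acc.1 ++ [letter], acc.2.1, acc.2.2)
      else if PySem.Chars.islower letter then (acc.1, acc.2.1 ++ [letter], acc.2.2)
      else (acc.1, acc.2.1, acc.2.2 ++ [letter]))
    ([' '], [' '], [' '])
  String.ofList (PySem.Chars.replace (acc.1 ++ acc.2.1 ++ acc.2.2) [' '] [])

-- ===== PORT B =====
def pvCaseKey (c : Char) : Int :=
  if PySem.Chars.isupper c then 0 else if PySem.Chars.islower c then 1 else 2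

def get_sorted_mixed_case_words_alt (word : String) : String :=
  String.ofList (PySem.List.sorted (word.toList.filter (fun c => c ≠ ' ')) pvCaseKey false)

-- ===== PRECONDITION & SPEC =====
def Spec_get_sorted_mixed_case_words (word : String) (out : String) : Prop := out = get_sorted_mixed_case_words_alt word
instance (word : String) (out : String) : Decidable (Spec_get_sorted_mixed_case_words word out) := by unfold Spec_get_sorted_mixed_case_words; infer_instance

-- ===== CLAIM (what is proved, stated in full; the proofs are below) =====
def Claim_equal_get_sorted_mixed_case_words : Prop := ∀ (word : String), Dom_get_sorted_mixed_case_words word → Spec_get_sorted_mixed_case_words word (get_sorted_mixed_case_words word)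

-- ===== LEMMAS AND PROOFS =====

-- A's loop accumulates the three category filters onto the initial accumulators.
theorem foldA_eq (cs : List Char) (u l o : List Char) :
    cs.foldl (fun (acc : List Char × List Char × List Char) letter =>
      if PySem.Chars.isupper letter then (acc.1 ++ [letter], acc.2.1, acc.2.2)
      else if PySem.Chars.islower letter then (acc.1, acc.2.1 ++ [letter], acc.2.2)
      else (acc.1, acc.2.1, acc.2.2 ++ [letter])) (u, l, o)
    = (u ++ cs.filter (fun c => PySem.Chars.isupper c),
       l ++ cs.filter (fun c => !PySem.Chars.isupper c && PySem.Chars.islower c),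
       o ++ cs.filter (fun c => !PySem.Chars.isupper c && !PySem.Chars.islower c)) := by
  induction cs generalizing u l o with
  | nil => simp
  | cons c t ih =>
    by_cases hu : PySem.Chars.isupper c
    · simp [List.foldl_cons, hu, ih]
    · by_cases hl : PySem.Chars.islower c
      · simp [List.foldl_cons, hu, hl, ih]
      · simp [List.foldl_cons, hu, hl, ih]

-- replace(s, " ", "") drops exactly the space characters.
theorem replace_space_go (fuel : Nat) (l acc : List Char) (h : l.length ≤ fuel) :
    PySem.Chars.replace.go [' '] [] fuel l acc = acc.reverse ++ l.filter (fun c => c ≠ ' ') := by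
  induction fuel generalizing l acc with
  | zero =>
    cases l with
    | nil => simp [PySem.Chars.replace.go]
    | cons c t => simp at h
  | succ n ih =>
    cases l with
    | nil => simp [PySem.Chars.replace.go]
    | cons c t =>
      simp only [List.length_cons] at h
      by_cases hc : c = ' '
      · subst hc
        have : List.isPrefixOf [' '] (' ' :: t) = true := by simp [List.isPrefixOf]
        simp [PySem.Chars.replace.go, this, ih t acc (by omega)]
      · have hp : List.isPrefixOf [' '] (c :: t) = false := by
          simp [List.isPrefixOf]; exact fun h' => hc h'.symm
        simp [PySem.Chars.replace.go, hp, ih t (c :: acc) (by omega), hc]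

theorem replace_space (cs : List Char) :
    PySem.Chars.replace cs [' '] [] = cs.filter (fun c => c ≠ ' ') := by
  simpa [PySem.Chars.replace] using replace_space_go cs.length cs [] le_rfl

-- inserting behind a prefix none of whose elements come after x
theorem insertBy_append_not_before {α : Type} (before : α → α → Bool) (x : α)
    (ys zs : List α) (h : ∀ y ∈ ys, before x y = false) :
    PySem.List.insertBy before x (ys ++ zs) = ys ++ PySem.List.insertBy before x zs := by
  induction ys with
  | nil => simp
  | cons y t ih =>
    have hy : before x y = false := h y (by simp)
    simp [PySem.List.insertBy, hy, ih (fun y hy => h y (by simp [hy]))]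

theorem insertBy_head_before {α : Type} (before : α → α → Bool) (x : α)
    (zs : List α) (h : ∀ y ∈ zs, before x y = true) :
    PySem.List.insertBy before x zs = x :: zs := by
  cases zs with
  | nil => simp [PySem.List.insertBy]
  | cons z t => simp [PySem.List.insertBy, h z (by simp)]

-- the stable sort on a three-valued key is the concatenation of the three filters
theorem sorted3 (cs : List Char) :
    PySem.List.sorted cs pvCaseKey false
      = cs.filter (fun c => pvCaseKey c = 0) ++ cs.filter (fun c => pvCaseKey c = 1)
        ++ cs.filter (fun c => pvCaseKey c = 2) := by
  rw [PySem.List.sorted_eq_foldl_insertBy]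
  induction cs using List.reverseRecOn with
  | nil => simp
  | append_singleton t x ih =>
    rw [List.foldl_append, List.foldl_cons, List.foldl_nil, ih]
    have key_le : ∀ c : Char, pvCaseKey c ≤ 2 := by
      intro c; unfold pvCaseKey; split_ifs <;> simp
    have f0 : ∀ y ∈ t.filter (fun c => pvCaseKey c = 0), pvCaseKey y = 0 := by
      intro y hy; simpa using (List.of_mem_filter hy)
    have f1 : ∀ y ∈ t.filter (fun c => pvCaseKey c = 1), pvCaseKey y = 1 := by
      intro y hy; simpa using (List.of_mem_filter hy)
    have f2 : ∀ y ∈ t.filter (fun c => pvCaseKey c = 2), pvCaseKey y = 2 := by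
      intro y hy; simpa using (List.of_mem_filter hy)
    have key_mem : pvCaseKey x = 0 ∨ pvCaseKey x = 1 ∨ pvCaseKey x = 2 := by
      unfold pvCaseKey; split_ifs <;> simp
    rcases key_mem with hx | hx | hx
    · rw [List.append_assoc,
        insertBy_append_not_before _ x _ _ (by intro y hy; simp [f0 y hy, hx]),
        insertBy_head_before _ x _ (by
          intro y hy
          rcases List.mem_append.1 hy with h | h
          · simp [f1 y h, hx]
          · simp [f2 y h, hx])]
      simp [List.filter_append, hx]
    · rw [insertBy_append_not_before _ x _ _ (by
        intro y hy
        rcases List.mem_append.1 hy with h | h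
        · simp [f0 y h, hx]
        · simp [f1 y h, hx]),
        insertBy_head_before _ x _ (by intro y hy; simp [f2 y hy, hx])]
      simp [List.filter_append, hx]
    · rw [PySem.List.insertBy_of_forall_not_before _ x _ (by
        intro y hy
        have hle : pvCaseKey y ≤ 2 := key_le y
        simp [hx]; omega)]
      simp [List.filter_append, hx]

theorem isupper_ne_space (c : Char) (h : PySem.Chars.isupper c = true) : c ≠ ' ' := by
  intro he; subst he; simp [PySem.Chars.isupper] at h

theorem islower_ne_space (c : Char) (h : PySem.Chars.islower c = true) : c ≠ ' ' := by
  intro he; subst he; simp [PySem.Chars.islower] at h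

theorem key0_iff (a : Char) :
    (decide (a ≠ ' ') && PySem.Chars.isupper a)
      = (decide (pvCaseKey a = 0) && decide (a ≠ ' ')) := by
  unfold pvCaseKey
  by_cases hu : PySem.Chars.isupper a
  · simp [hu, isupper_ne_space a hu]
  · simp [hu]; split_ifs <;> simp

theorem key1_iff (a : Char) :
    (decide (a ≠ ' ') && (!PySem.Chars.isupper a && PySem.Chars.islower a))
      = (decide (pvCaseKey a = 1) && decide (a ≠ ' ')) := by
  unfold pvCaseKey
  by_cases hu : PySem.Chars.isupper a
  · simp [hu]
  · by_cases hl : PySem.Chars.islower a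
    · simp [hu, hl, islower_ne_space a hl]
    · simp [hu, hl]

theorem key2_iff (a : Char) :
    (decide (a ≠ ' ') && (!PySem.Chars.isupper a && !PySem.Chars.islower a))
      = (decide (pvCaseKey a = 2) && decide (a ≠ ' ')) := by
  unfold pvCaseKey
  by_cases hu : PySem.Chars.isupper a
  · simp [hu]
  · by_cases hl : PySem.Chars.islower a <;> simp [hu, hl]

-- ===== VERDICT (by name: the statement is the Claim_ definition above) =====
theorem get_sorted_mixed_case_words_spec : Claim_equal_get_sorted_mixed_case_words := by
  intro word _
  show get_sorted_mixed_case_words word = get_sorted_mixed_case_words_alt word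
  simp only [get_sorted_mixed_case_words, get_sorted_mixed_case_words_alt, foldA_eq]
  rw [replace_space, sorted3]
  congr 1
  have hsp : (([' '] : List Char).filter (fun c => decide (c ≠ ' ')) : List Char) = [] := by decide
  simp only [List.filter_append, List.filter_filter, hsp, List.nil_append]
  congr 1
  congr 1
  · exact List.filter_congr (fun a _ => key0_iff a)
  · exact List.filter_congr (fun a _ => key1_iff a)
  · exact List.filter_congr (fun a _ => key2_iff a)
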